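-- pv_equiv track=rewrite | github.com/MrBrantCode/unitest_baseline | mut_generate/mist_train_cf/cf_70400/solution.py | count_subsegments
-- ===== SOURCE A (Python) =====
-- def count_subsegments(string):
--     vowels = set("AEIOUaeiou")
--     n = len(string)
--
--     res, consonant_pointer, vowel_pointer = 0, 0, 0
--
--     for i in range(0, n, 1):
--         if (string[i] not in vowels):
--             consonant_pointer += 1
--             vowel_pointer = 0
--
--         else:
--             vowel_pointer += 1
--             res += consonant_pointer
--
--     return res
-- ===== SOURCE B (Python) =====
-- def count_subsegments(string):
--     vowels = set("AEIOUaeiou")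
--     res = 0
--     cons_before = 0
--     i = 0
--     n = len(string)
--     while i < n:
--         j = i
--         if string[i] in vowels:
--             # scan the whole maximal vowel run
--             while j < n and string[j] in vowels:
--                 j += 1
--             res += (j - i) * cons_before
--         else:
--             # scan the whole maximal consonant run
--             while j < n and string[j] not in vowels:
--                 j += 1
--             cons_before += j - i
--         i = j
--     return res
-- ===== Notes on version B (the rewrite author's own statement) =====
-- stated objective: alternative
-- what changed: A does a per-character pass adding a consonant counter at every vowel; B decomposes the string into maximal vowel/consonant runs and adds per vowel-run the product run_length * consonants_before, so the accumulation happens once per run with a multiplication instead of once per character.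
import Mathlib
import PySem

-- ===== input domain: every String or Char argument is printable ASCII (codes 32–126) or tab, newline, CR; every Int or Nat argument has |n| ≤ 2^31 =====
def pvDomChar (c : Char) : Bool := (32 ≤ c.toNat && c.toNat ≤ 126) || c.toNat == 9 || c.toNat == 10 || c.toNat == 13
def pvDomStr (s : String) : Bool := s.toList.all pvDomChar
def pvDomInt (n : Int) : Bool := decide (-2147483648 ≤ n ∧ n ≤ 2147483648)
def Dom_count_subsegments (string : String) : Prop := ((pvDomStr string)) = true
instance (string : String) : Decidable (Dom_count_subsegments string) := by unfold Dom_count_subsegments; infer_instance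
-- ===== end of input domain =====

-- B replaces A's per-character pass by a run-length decomposition: it splits the string into maximal vowel/consonant runs and adds run_length * consonants_before once per vowel run (alternative decomposition, same asymptotic cost).


-- shared helper: the vowels set (Python: vowels = set("AEIOUaeiou"); ch in vowels)
def pvVowels : PySem.Set Char := PySem.Set.ofList "AEIOUaeiou".toList

def pvIsVowel (c : Char) : Bool := PySem.Set.contains pvVowels c

-- ===== PORT A =====
-- forward pass over the characters with state (res, consonant_pointer, vowel_pointer)
def count_subsegments (string : String) : Int :=
  let st := string.toList.foldl
    (fun (st : Int × Int × Int) c =>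
      if ¬ PySem.Set.contains pvVowels c then (st.1, st.2.1 + 1, 0)
      else (st.1 + st.2.1, st.2.1, st.2.2 + 1))
    (0, 0, 0)
  st.1

-- ===== PORT B =====
-- Source B's outer while-loop: one recursive call per maximal run; the inner
-- index-scans 'while j < n and string[j] (not) in vowels: j += 1' are exactly
-- takeWhile/dropWhile on the remaining characters (j - i = the run's length).
-- State: (remaining characters, cons_before, res).
def pvGoRuns (l : List Char) (consBefore res : Int) : Int :=
  match l with
  | [] => res
  | c :: t =>
    if hv : pvIsVowel c then
      pvGoRuns ((c :: t).dropWhile pvIsVowel) consBefore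
        (res + (((c :: t).takeWhile pvIsVowel).length : Int) * consBefore)
    else
      pvGoRuns ((c :: t).dropWhile (fun x => !pvIsVowel x))
        (consBefore + (((c :: t).takeWhile (fun x => !pvIsVowel x)).length : Int)) res
termination_by l.length
decreasing_by
  · simp only [List.dropWhile_cons, hv, if_pos]
    exact Nat.lt_succ_of_le (List.length_dropWhile_le _ _)
  · have : (!pvIsVowel c) = true := by simp [hv]
    simp only [List.dropWhile_cons, this, if_pos]
    exact Nat.lt_succ_of_le (List.length_dropWhile_le _ _)

def count_subsegments_alt (string : String) : Int :=
  pvGoRuns string.toList 0 0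

-- ===== PRECONDITION & SPEC =====
def Spec_count_subsegments (string : String) (out : Int) : Prop := out = count_subsegments_alt string
instance (string : String) (out : Int) : Decidable (Spec_count_subsegments string out) := by unfold Spec_count_subsegments; infer_instance

-- ===== CLAIM (what is proved, stated in full; the proofs are below) =====
def Claim_equal_count_subsegments : Prop := ∀ (string : String), Dom_count_subsegments string → Spec_count_subsegments string (count_subsegments string)

-- ===== LEMMAS AND PROOFS =====

-- number of vowels / consonants in a list
def pvV (l : List Char) : Int := l.foldr (fun c a => (if pvIsVowel c then 1 else 0) + a) 0
def pvC (l : List Char) : Int := l.foldr (fun c a => (if pvIsVowel c then 0 else 1) + a) 0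
-- pairs (consonant strictly before vowel)
def pvG (l : List Char) : Int :=
  match l with
  | [] => 0
  | c :: t => (if pvIsVowel c then 0 else pvV t) + pvG t

lemma pvV_cons (c : Char) (t : List Char) :
    pvV (c :: t) = (if pvIsVowel c then 1 else 0) + pvV t := rfl
lemma pvC_cons (c : Char) (t : List Char) :
    pvC (c :: t) = (if pvIsVowel c then 0 else 1) + pvC t := rfl
lemma pvG_cons (c : Char) (t : List Char) :
    pvG (c :: t) = (if pvIsVowel c then 0 else pvV t) + pvG t := rfl

lemma pvA_fold (l : List Char) (r cp vp : Int) :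
    (l.foldl (fun (st : Int × Int × Int) c =>
      if ¬ PySem.Set.contains pvVowels c then (st.1, st.2.1 + 1, 0)
      else (st.1 + st.2.1, st.2.1, st.2.2 + 1)) (r, cp, vp)).1
      = r + cp * pvV l + pvG l := by
  induction l generalizing r cp vp with
  | nil => simp [pvV, pvG]
  | cons c t ih =>
    rw [List.foldl_cons]
    by_cases h : c ∈ pvVowels
    · have hd : (if ¬ PySem.Set.contains pvVowels c then ((r : Int), cp + 1, (0 : Int))
          else (r + cp, cp, vp + 1)) = (r + cp, cp, vp + 1) := by simp [h]
      rw [hd, ih, pvV_cons, pvG_cons]; simp [pvIsVowel, h]; ring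
    · have hd : (if ¬ PySem.Set.contains pvVowels c then ((r : Int), cp + 1, (0 : Int))
          else (r + cp, cp, vp + 1)) = (r, cp + 1, 0) := by simp [h]
      rw [hd, ih, pvV_cons, pvG_cons]; simp [pvIsVowel, h]; ring

lemma pvV_append (a b : List Char) : pvV (a ++ b) = pvV a + pvV b := by
  induction a with
  | nil => simp [pvV]
  | cons x t ih => rw [List.cons_append, pvV_cons, pvV_cons, ih]; ring

lemma pvG_append (a b : List Char) :
    pvG (a ++ b) = pvG a + pvC a * pvV b + pvG b := by
  induction a with
  | nil => simp [pvG, pvC]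
  | cons x t ih =>
    rw [List.cons_append, pvG_cons, pvG_cons, pvC_cons, pvV_append, ih]
    by_cases h : pvIsVowel x = true <;> simp [h] <;> ring

lemma pvRunVowel (a : List Char) (h : ∀ x ∈ a, pvIsVowel x = true) :
    pvV a = (a.length : Int) ∧ pvC a = 0 ∧ pvG a = 0 := by
  induction a with
  | nil => simp [pvV, pvC, pvG]
  | cons x t ih =>
    have hx := h x (List.mem_cons_self)
    have ht := ih (fun y hy => h y (List.mem_cons_of_mem _ hy))
    rw [pvV_cons, pvC_cons, pvG_cons]
    refine ⟨?_, ?_, ?_⟩ <;> simp [hx, ht.1, ht.2.1, ht.2.2] <;> push_cast <;> ring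

lemma pvRunCons (a : List Char) (h : ∀ x ∈ a, pvIsVowel x = false) :
    pvV a = 0 ∧ pvC a = (a.length : Int) ∧ pvG a = 0 := by
  induction a with
  | nil => simp [pvV, pvC, pvG]
  | cons x t ih =>
    have hx := h x (List.mem_cons_self)
    have ht := ih (fun y hy => h y (List.mem_cons_of_mem _ hy))
    rw [pvV_cons, pvC_cons, pvG_cons]
    refine ⟨?_, ?_, ?_⟩ <;> simp [hx, ht.1, ht.2.1, ht.2.2] <;> push_cast <;> ring

lemma pvGoRuns_eq (l : List Char) (k res : Int) :
    pvGoRuns l k res = res + k * pvV l + pvG l := by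
  induction l, k, res using pvGoRuns.induct with
  | case1 k res => simp [pvGoRuns, pvV, pvG]
  | case2 k res c t hv ih =>
    rw [pvGoRuns]
    simp only [hv, dif_pos]
    rw [ih]
    have hsplit := List.takeWhile_append_dropWhile (p := pvIsVowel) (l := c :: t)
    have hr := pvRunVowel ((c :: t).takeWhile pvIsVowel)
      (fun x hx => List.mem_takeWhile_imp hx)
    calc res + (((c :: t).takeWhile pvIsVowel).length : Int) * k
          + k * pvV ((c :: t).dropWhile pvIsVowel) + pvG ((c :: t).dropWhile pvIsVowel)
        = res + k * (pvV ((c :: t).takeWhile pvIsVowel) + pvV ((c :: t).dropWhile pvIsVowel))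
          + (pvG ((c :: t).takeWhile pvIsVowel)
             + pvC ((c :: t).takeWhile pvIsVowel) * pvV ((c :: t).dropWhile pvIsVowel)
             + pvG ((c :: t).dropWhile pvIsVowel)) := by
          rw [hr.1, hr.2.1, hr.2.2]; ring
      _ = res + k * pvV (c :: t) + pvG (c :: t) := by
          rw [← pvV_append, ← pvG_append, hsplit]
  | case3 k res c t hv ih =>
    rw [pvGoRuns]
    simp only [hv]
    rw [ih]
    have hsplit := List.takeWhile_append_dropWhile (p := fun x => !pvIsVowel x) (l := c :: t)
    have hr := pvRunCons ((c :: t).takeWhile (fun x => !pvIsVowel x))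
      (fun x hx => by
        have := List.mem_takeWhile_imp hx
        simpa using this)
    calc res
          + (k + (((c :: t).takeWhile (fun x => !pvIsVowel x)).length : Int))
            * pvV ((c :: t).dropWhile (fun x => !pvIsVowel x))
          + pvG ((c :: t).dropWhile (fun x => !pvIsVowel x))
        = res + k * (pvV ((c :: t).takeWhile (fun x => !pvIsVowel x))
              + pvV ((c :: t).dropWhile (fun x => !pvIsVowel x)))
          + (pvG ((c :: t).takeWhile (fun x => !pvIsVowel x))
             + pvC ((c :: t).takeWhile (fun x => !pvIsVowel x))
               * pvV ((c :: t).dropWhile (fun x => !pvIsVowel x))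
             + pvG ((c :: t).dropWhile (fun x => !pvIsVowel x))) := by
          rw [hr.1, hr.2.1, hr.2.2]; ring
      _ = res + k * pvV (c :: t) + pvG (c :: t) := by
          rw [← pvV_append, ← pvG_append, hsplit]

-- ===== VERDICT (by name: the statement is the Claim_ definition above) =====
theorem count_subsegments_spec : Claim_equal_count_subsegments := by
  intro s _
  unfold Spec_count_subsegments count_subsegments count_subsegments_alt
  rw [pvA_fold, pvGoRuns_eq]
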